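-- pv_equiv track=rewrite | github.com/hakanozadam/bal | bal/annotation/intron.py | get_intron_boundries_from_exon_boundires
-- ===== SOURCE A (Python) =====
-- def get_intron_boundries_from_exon_boundires(exon_boundries):
--     '''
--     The input is an iterable of pairs where the first element of the pair
--     is the exon start location and the second eleement of the pair is exon end location
--     This function outputs a list of pairs where the first element of the pair is
--     an intron start and the second element is an intron end
--
--     The boundries of exons and introns are one-based and both inclusive
--     '''
--     intron_boundries = list()
--     if len(exon_boundries) < 2:
--         return list()
--     intron_start = exon_boundries[0][1] + 1
--     for exon in exon_boundries[1:]: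
--         intron_end = exon[0] - 1
--         intron_boundries.append( (intron_start, intron_end) )
--         intron_start = exon[1] + 1
--
--     return intron_boundries
-- ===== SOURCE B (Python) =====
-- def get_intron_boundries_from_exon_boundires(exon_boundries):
--     # Flatten all exon coordinates into one ordered list, strip the outer
--     # chromosome ends, and regroup the interior coordinates pairwise:
--     # each consecutive pair (exon_end, next_exon_start) frames one intron.
--     flat = [coord for exon in exon_boundries for coord in exon]
--     inner = iter(flat[1:-1])
--     return [(e + 1, s - 1) for e, s in zip(inner, inner)]
-- ===== Notes on version B (the rewrite author's own statement) =====
-- stated objective: alternative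
-- what changed: Instead of walking exon pairs with a carried intron_start state, B flattens all exon coordinates into one list, strips the first and last coordinate, and regroups the remaining interior coordinates into consecutive pairs, each of which frames one intron.
import Mathlib
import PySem

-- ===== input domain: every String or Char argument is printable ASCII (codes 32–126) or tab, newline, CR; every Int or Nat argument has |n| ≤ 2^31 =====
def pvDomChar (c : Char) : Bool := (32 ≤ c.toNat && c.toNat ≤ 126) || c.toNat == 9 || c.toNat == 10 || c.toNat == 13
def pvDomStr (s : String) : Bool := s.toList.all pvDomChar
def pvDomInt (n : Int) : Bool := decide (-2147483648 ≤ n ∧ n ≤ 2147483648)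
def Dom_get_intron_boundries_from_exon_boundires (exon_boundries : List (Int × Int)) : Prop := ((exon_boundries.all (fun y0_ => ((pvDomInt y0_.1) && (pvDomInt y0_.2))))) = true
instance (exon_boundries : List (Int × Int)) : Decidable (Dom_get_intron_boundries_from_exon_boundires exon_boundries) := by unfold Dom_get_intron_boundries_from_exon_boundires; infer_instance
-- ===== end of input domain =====

-- B flattens all exon coordinates, strips the two outer ends and regroups the
-- interior coordinates pairwise, instead of A's stateful carried-start loop (objective: alternative).
-- ===== PORT A =====
def get_intron_boundries_from_exon_boundires (exon_boundries : List (Int × Int)) : List (Int × Int) :=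
  if exon_boundries.length < 2 then []
  else
    match exon_boundries with
    | [] => []
    | first :: rest =>
      (rest.foldl
        (fun (st : List (Int × Int) × Int) exon =>
          (st.1 ++ [(st.2, exon.1 - 1)], exon.2 + 1))
        ([], first.2 + 1)).1

-- ===== PORT B =====
-- zip(it, it) over one shared iterator groups consecutive elements in pairs;
-- ported exactly as that pairwise chunking.
def pvChunk2 : List Int → List (Int × Int)
  | e :: s :: rest => (e + 1, s - 1) :: pvChunk2 rest
  | _ => []

def get_intron_boundries_from_exon_boundires_alt (exon_boundries : List (Int × Int)) : List (Int × Int) :=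
  pvChunk2 (PySem.List.slice (exon_boundries.flatMap (fun exon => [exon.1, exon.2])) (some 1) (some (-1)))

-- ===== PRECONDITION & SPEC =====
def Spec_get_intron_boundries_from_exon_boundires (exon_boundries : List (Int × Int)) (out : List (Int × Int)) : Prop := out = get_intron_boundries_from_exon_boundires_alt exon_boundries
instance (exon_boundries : List (Int × Int)) (out : List (Int × Int)) : Decidable (Spec_get_intron_boundries_from_exon_boundires exon_boundries out) := by unfold Spec_get_intron_boundries_from_exon_boundires; infer_instance

-- ===== CLAIM (what is proved, stated in full; the proofs are below) =====
def Claim_equal_get_intron_boundries_from_exon_boundires : Prop := ∀ (exon_boundries : List (Int × Int)), Dom_get_intron_boundries_from_exon_boundires exon_boundries → Spec_get_intron_boundries_from_exon_boundires exon_boundries (get_intron_boundries_from_exon_boundires exon_boundries)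

-- ===== LEMMAS AND PROOFS =====
-- Functional view of A's loop: the introns produced from carried start `s` over the remaining exons.
def pvIntrons : Int → List (Int × Int) → List (Int × Int)
  | _, [] => []
  | s, e :: es => (s, e.1 - 1) :: pvIntrons (e.2 + 1) es

theorem pv_foldl_introns (xs : List (Int × Int)) (acc : List (Int × Int)) (s : Int) :
    (xs.foldl (fun (st : List (Int × Int) × Int) exon =>
        (st.1 ++ [(st.2, exon.1 - 1)], exon.2 + 1)) (acc, s)).1
    = acc ++ pvIntrons s xs := by
  induction xs generalizing acc s with
  | nil => simp [pvIntrons]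
  | cons e es ih => simp [List.foldl_cons, ih, pvIntrons]

-- xs[1:-1] is tail + dropLast
theorem pv_slice_one_neg_one (xs : List Int) :
    PySem.List.slice xs (some 1) (some (-1)) = xs.tail.dropLast := by
  rcases xs with _ | ⟨a, ys⟩
  · simp [PySem.List.slice]
  · simp [PySem.List.slice, PySem.List.clampIdx, List.dropLast_eq_take]
    rw [if_neg (by omega)]
    omega

-- the interior coordinates of (first :: rest), chunked in pairs, are A's introns
theorem pv_chunk_flat (first : Int × Int) (rest : List (Int × Int)) :
    pvChunk2 (((first :: rest).flatMap (fun exon => [exon.1, exon.2])).tail.dropLast)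
    = pvIntrons (first.2 + 1) rest := by
  induction rest generalizing first with
  | nil => simp [List.flatMap_cons, pvIntrons, pvChunk2]
  | cons b bs ih =>
    have h := ih b
    simp only [List.flatMap_cons] at h ⊢
    rcases hbs : bs.flatMap (fun exon => [exon.1, exon.2]) with _ | ⟨c, cs⟩
    · simp [hbs] at h ⊢
      simp [pvChunk2, pvIntrons, ← h]
    · simp [hbs] at h ⊢
      simp [pvChunk2, pvIntrons, ← h]

-- ===== VERDICT (by name: the statement is the Claim_ definition above) =====
theorem get_intron_boundries_from_exon_boundires_spec : Claim_equal_get_intron_boundries_from_exon_boundires := by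
  intro xs _
  unfold Spec_get_intron_boundries_from_exon_boundires
  unfold get_intron_boundries_from_exon_boundires get_intron_boundries_from_exon_boundires_alt
  rw [pv_slice_one_neg_one]
  match xs with
  | [] => simp [pvChunk2]
  | [a] => simp [List.flatMap_cons, pvChunk2]
  | a :: b :: rest =>
    rw [if_neg (show ¬ (a :: b :: rest).length < 2 by simp)]
    show (List.foldl _ ([], a.2 + 1) (b :: rest)).1 = _
    rw [pv_foldl_introns, pv_chunk_flat a (b :: rest)]
    simp
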